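-- pv_equiv track=rewrite | github.com/tabboud/mpkernel | unix/unix.py | _no_echo
-- ===== SOURCE A (Python) =====
-- def _no_echo(buf):
--     """Filter out input-echo"""
--     store = False
--     lines = []
--     for line in buf.splitlines(True):
--         if store:
--             lines.append(line)
--         elif '\r\n' == line:
--             store = True
--     return ''.join(lines)
-- ===== SOURCE B (Python) =====
-- def _no_echo(buf):
--     """Filter out input-echo"""
--     head, sep, tail = buf.partition('\r\n')
--     while sep:
--         if not head or head[-1] in '\r\n':
--             return tail
--         head, sep, tail = tail.partition('\r\n')
--     return ''
-- ===== Notes on version B (the rewrite author's own statement) =====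
-- stated objective: alternative
-- what changed: B never calls splitlines and keeps no store flag or line list: it walks the raw string with repeated str.partition on the CRLF separator, returning the tail of the first CRLF occurrence that sits at a line start (nothing before it, or preceded by a CR or LF character).
import Mathlib
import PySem

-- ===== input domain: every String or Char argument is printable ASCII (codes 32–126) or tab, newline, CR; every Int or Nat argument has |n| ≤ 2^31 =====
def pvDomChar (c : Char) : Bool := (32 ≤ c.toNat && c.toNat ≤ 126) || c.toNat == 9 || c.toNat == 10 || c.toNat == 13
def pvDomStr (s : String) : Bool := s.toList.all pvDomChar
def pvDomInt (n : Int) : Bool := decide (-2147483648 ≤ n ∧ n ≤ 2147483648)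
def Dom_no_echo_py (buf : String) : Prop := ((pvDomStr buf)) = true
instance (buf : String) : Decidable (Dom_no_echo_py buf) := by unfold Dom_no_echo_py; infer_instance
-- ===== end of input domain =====

-- B drops A's splitlines + store-flag accumulation entirely and instead walks the raw string by
-- repeated partition('\r\n'), returning the tail after the first CRLF that sits at a line start
-- (objective: alternative decomposition).

-- ===== PORT A =====
-- buf.splitlines(True) (keepends), ported by hand: exact on the Dom_ character set,
-- where the only line boundaries Python recognises are '\n', '\r' and '\r\n'.
def pvSplitKeep (acc : List Char) : List Char → List (List Char)
  | [] => if acc = [] then [] else [acc.reverse]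
  | '\r' :: '\n' :: rest => (acc.reverse ++ ['\r', '\n']) :: pvSplitKeep [] rest
  | '\r' :: rest => (acc.reverse ++ ['\r']) :: pvSplitKeep [] rest
  | '\n' :: rest => (acc.reverse ++ ['\n']) :: pvSplitKeep [] rest
  | c :: rest => pvSplitKeep (c :: acc) rest

-- loop state: (store, lines)
def pvStepA (st : Bool × List (List Char)) (line : List Char) : Bool × List (List Char) :=
  if st.1 then (st.1, st.2 ++ [line])
  else if line = ['\r', '\n'] then (true, st.2)
  else st

def no_echo_py (buf : String) : String :=
  String.mk (PySem.Chars.join [] ((pvSplitKeep [] buf.toList).foldl pvStepA (false, [])).2)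

-- ===== PORT B =====
-- s.partition('\r\n') on code points: (before, found?, after); exact — partition splits at the
-- first occurrence of the separator, here matched literally.
def pvPartition : List Char → List Char × Bool × List Char
  | '\r' :: '\n' :: rest => ([], true, rest)
  | c :: rest =>
      let p := pvPartition rest
      (c :: p.1, p.2.1, p.2.2)
  | [] => ([], false, [])

-- termination fact for the while-loop below
theorem pvPartition_sep_lt : ∀ s : List Char, (pvPartition s).2.1 = true → (pvPartition s).2.2.length < s.length := by
  intro s
  fun_induction pvPartition s with
  | case1 rest => simp
  | case2 c rest _ p ih =>
    simp only [p] at *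
    intro h
    have := ih h
    simp only [List.length_cons]
    omega
  | case3 => simp

-- Source B's while-loop: partition the remaining text at the next '\r\n'; if it is at a line start
-- (nothing before it, or the char before it is '\r' or '\n'), return the tail, else continue.
def pvLoopB (s : List Char) : List Char :=
  let p := pvPartition s
  if hsep : p.2.1 = true then
    if p.1 = [] ∨ p.1.getLast? = some '\r' ∨ p.1.getLast? = some '\n' then p.2.2
    else pvLoopB p.2.2
  else []
termination_by s.length
decreasing_by exact pvPartition_sep_lt s hsep

def no_echo_py_alt (buf : String) : String :=
  String.mk (pvLoopB buf.toList)

-- ===== PRECONDITION & SPEC =====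
def Spec_no_echo_py (buf : String) (out : String) : Prop := out = no_echo_py_alt buf
instance (buf : String) (out : String) : Decidable (Spec_no_echo_py buf out) := by unfold Spec_no_echo_py; infer_instance

-- ===== CLAIM (what is proved, stated in full; the proofs are below) =====
def Claim_equal_no_echo_py : Prop := ∀ (buf : String), Dom_no_echo_py buf → Spec_no_echo_py buf (no_echo_py buf)

-- ===== LEMMAS AND PROOFS =====

-- reference scanner (proof device): walk char by char remembering whether we are at a line start;
-- on a '\r\n' at a line start return the rest, else keep scanning.
def refScan : Bool → List Char → List Char
  | _, [] => []
  | b, c :: rest =>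
    if c = '\r' ∧ rest.head? = some '\n' then
      (if b then rest.tail else refScan true rest.tail)
    else if c = '\r' ∨ c = '\n' then refScan true rest
    else refScan false rest
termination_by _ l => l.length
decreasing_by
  · have : rest.tail.length ≤ rest.length := by cases rest <;> simp
    simp only [List.length_cons]; omega
  · simp
  · simp

-- "no '\r\n' substring"
def noCRLF : List Char → Bool
  | [] => true
  | c :: rest => !(c == '\r' && rest.head? == some '\n') && noCRLF rest

theorem join_nil_eq_flatten : ∀ l : List (List Char), PySem.Chars.join [] l = l.flatten := by
  intro l
  induction l with
  | nil => simp [PySem.Chars.join_nil]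
  | cons a l ih =>
    cases l with
    | nil => simp [PySem.Chars.join_singleton]
    | cons b m => rw [PySem.Chars.join_cons_cons]; simp only [ih]; simp

-- A-side bridge: once store is true, A appends every remaining line
theorem foldl_stepA_true (ls : List (List Char)) (acc : List (List Char)) :
    (ls.foldl pvStepA (true, acc)).2 = acc ++ ls := by
  induction ls generalizing acc with
  | nil => simp
  | cons l ls ih => simp [pvStepA, ih]

def pvFindTail : List (List Char) → List Char
  | [] => []
  | l :: ls => if l = ['\r', '\n'] then PySem.Chars.join [] ls else pvFindTail ls

theorem join_foldl_eq_findTail (ls : List (List Char)) :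
    PySem.Chars.join [] (ls.foldl pvStepA (false, [])).2 = pvFindTail ls := by
  induction ls with
  | nil => simp [pvFindTail, PySem.Chars.join_nil]
  | cons l ls ih =>
    by_cases h : l = ['\r', '\n']
    · simp [pvFindTail, h, List.foldl_cons, pvStepA, foldl_stepA_true]
    · simp [pvFindTail, h, List.foldl_cons, pvStepA, ih]

-- splitlines(True) loses nothing
theorem join_splitKeep (acc : List Char) (s : List Char) :
    PySem.Chars.join [] (pvSplitKeep acc s) = acc.reverse ++ s := by
  fun_induction pvSplitKeep acc s with
  | case1 => simp [PySem.Chars.join_nil]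
  | case2 acc h => simp [PySem.Chars.join_singleton]
  | case3 acc rest ih => rw [join_nil_eq_flatten] at *; simpa using ih
  | case4 acc rest hne ih => rw [join_nil_eq_flatten] at *; simpa using ih
  | case5 acc rest ih => rw [join_nil_eq_flatten] at *; simpa using ih
  | case6 acc c rest h1 h2 h3 ih => simpa using ih

-- A's find-first-bare-CRLF-line over splitlines equals the reference scanner
theorem findTail_splitKeep (acc : List Char) (s : List Char) (hacc : '\r' ∉ acc) :
    pvFindTail (pvSplitKeep acc s) = refScan (acc = []) s := by
  fun_induction pvSplitKeep acc s with
  | case1 => simp [pvFindTail, refScan]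
  | case2 acc h =>
    have hbadne : acc.reverse ≠ ['\r', '\n'] := by
      intro hbad
      exact hacc (by
        have : acc = ['\n', '\r'] := by simpa using congrArg List.reverse hbad
        simp [this])
    simp [pvFindTail, refScan, hbadne]
  | case3 acc rest ih =>
    rw [pvFindTail, refScan]
    by_cases h : acc = []
    · subst h
      simp [join_splitKeep]
    · rw [if_neg (by simp [h]), if_pos (by simp), if_neg (by simp [h])]
      simpa using ih (by simp)
  | case4 acc rest hne ih =>
    rw [pvFindTail, refScan]
    have hb1 : acc.reverse ++ ['\r'] ≠ ['\r', '\n'] := by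
      intro hbad
      have := congrArg List.getLast? hbad
      simp at this
    have hb2 : ¬('\r' = '\r' ∧ rest.head? = some '\n') := by
      rintro ⟨-, hh⟩
      cases rest with
      | nil => simp at hh
      | cons d tl => simp at hh; exact hne tl (by rw [hh])
    rw [if_neg hb1, if_neg hb2, if_pos (by simp)]
    simpa using ih (by simp)
  | case5 acc rest ih =>
    rw [pvFindTail, refScan]
    rw [if_neg ?hbad, if_neg (by simp), if_pos (by simp)]
    · simpa using ih (by simp)
    · intro hbad2
      apply hacc
      have : acc = ['\r'] := by
        have := congrArg List.reverse hbad2; simpa using this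
      simp [this]
  | case6 acc c rest h1 h2 h3 ih =>
    rw [refScan]
    rw [if_neg (by rintro ⟨hc, -⟩; exact h2 hc), if_neg (by rintro (hc | hc); exacts [h2 hc, h3 hc])]
    have := ih (by simp [hacc]; rintro rfl; exact h2 rfl)
    simpa using this

-- refScan on a CRLF-free list returns []
theorem refScan_noCRLF (s : List Char) (b : Bool) (h : noCRLF s = true) : refScan b s = [] := by
  induction s generalizing b with
  | nil => simp [refScan]
  | cons c rest ih =>
    simp only [noCRLF, Bool.and_eq_true, Bool.not_eq_eq_eq_not, Bool.not_true,
      Bool.and_eq_false_iff, beq_eq_false_iff_ne, ne_eq] at h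
    rw [refScan]
    rw [if_neg (by rintro ⟨hc, hh⟩; rcases h.1 with h' | h' <;> [exact h' hc; exact h' hh])]
    split_ifs with h2
    · exact ih true h.2
    · exact ih false h.2

-- refScan across a CRLF-free prefix followed by '\r\n'
theorem refScan_decomp : ∀ (h t : List Char) (b : Bool), noCRLF h = true →
    refScan b (h ++ '\r' :: '\n' :: t) =
      if (h = [] ∧ b = true) ∨ h.getLast? = some '\r' ∨ h.getLast? = some '\n' then t
      else refScan true t := by
  intro h
  induction h with
  | nil =>
    intro t b _
    cases b <;> simp [refScan]
  | cons c h' ih =>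
    intro t b hfree
    simp only [noCRLF, Bool.and_eq_true, Bool.not_eq_eq_eq_not, Bool.not_true,
      Bool.and_eq_false_iff, beq_eq_false_iff_ne, ne_eq] at hfree
    obtain ⟨hnot, hf'⟩ := hfree
    cases h' with
    | nil =>
      rw [List.cons_append, List.nil_append, refScan]
      by_cases hc : c = '\r' ∧ ('\r' :: '\n' :: t).head? = some '\n'
      · simp at hc
      · rw [if_neg hc]
        have hscan : refScan true ('\r' :: '\n' :: t) = t := by rw [refScan]; simp
        by_cases h2 : c = '\r' ∨ c = '\n'
        · rw [if_pos h2, hscan, if_pos (by simp; tauto)]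
        · rw [if_neg h2, if_neg (by simp; tauto)]
          rw [refScan]; simp
    | cons d h'' =>
      rw [List.cons_append, refScan]
      have hne1 : ¬(c = '\r' ∧ ((d :: h'') ++ '\r' :: '\n' :: t).head? = some '\n') := by
        rintro ⟨hc, hh⟩
        simp at hh
        rcases hnot with h' | h'
        · exact h' hc
        · exact h' (by simp [hh])
      rw [if_neg hne1]
      by_cases h2 : c = '\r' ∨ c = '\n'
      · rw [if_pos h2, ih t true hf']
        simp only [List.getLast?_cons_cons]
        exact if_congr (by simp) rfl rfl
      · rw [if_neg h2, ih t false hf']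
        simp only [List.getLast?_cons_cons]
        exact if_congr (by simp) rfl rfl

-- B's partition loop equals the reference scanner
theorem pvPartition_spec : ∀ s : List Char,
    if (pvPartition s).2.1 then
      s = (pvPartition s).1 ++ '\r' :: '\n' :: (pvPartition s).2.2 ∧ noCRLF (pvPartition s).1 = true
    else noCRLF s = true := by
  intro s
  fun_induction pvPartition s with
  | case1 rest => simp [noCRLF]
  | case2 c rest hne p ih =>
    simp only [p] at *
    split_ifs at ih ⊢ with hs
    · obtain ⟨he, hf⟩ := ih
      refine ⟨by simpa using congrArg (c :: ·) he, ?_⟩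
      have hnot : ¬(c = '\r' ∧ (pvPartition rest).1.head? = some '\n') := by
        rintro ⟨hc, hh⟩
        rcases hl : (pvPartition rest).1 with _ | ⟨d, tl⟩
        · rw [hl] at hh; simp at hh
        · rw [hl] at hh; simp at hh
          have he2 := he
          rw [hl, hh] at he2
          exact hne (tl ++ '\x0d' :: '\n' :: (pvPartition rest).2.2) hc he2
      simp [noCRLF, hf]
      tauto
    · have hnot : ¬(c = '\r' ∧ rest.head? = some '\n') := by
        rintro ⟨hc, hh⟩
        cases rest with
        | nil => simp at hh
        | cons d tl => simp at hh; exact hne tl hc (by rw [hh])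
      simp [noCRLF, ih]
      tauto
  | case3 => simp [noCRLF]

theorem loopB_eq_refScan : ∀ s : List Char, pvLoopB s = refScan true s := by
  intro s
  fun_induction pvLoopB s with
  | case1 s p hsep hcond =>
    have hspec := pvPartition_spec s
    rw [show (pvPartition s).2.1 = true from hsep, if_pos rfl] at hspec
    obtain ⟨he, hf⟩ := hspec
    conv_rhs => rw [he]
    rw [refScan_decomp _ _ _ hf]
    simp only [p] at hcond ⊢
    rw [if_pos (by tauto)]
  | case2 s p hsep hcond ih =>
    have hspec := pvPartition_spec s
    rw [show (pvPartition s).2.1 = true from hsep, if_pos rfl] at hspec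
    obtain ⟨he, hf⟩ := hspec
    conv_rhs => rw [he]
    rw [refScan_decomp _ _ _ hf]
    simp only [p] at hcond ⊢
    rw [if_neg (by tauto)]
    exact ih
  | case3 s p hsep =>
    have hspec := pvPartition_spec s
    rw [Bool.not_eq_true] at hsep
    rw [show (pvPartition s).2.1 = false from hsep] at hspec
    simp only [Bool.false_eq_true, if_false] at hspec
    exact (refScan_noCRLF s true hspec).symm

-- ===== VERDICT (by name: the statement is the Claim_ definition above) =====
theorem no_echo_py_spec : Claim_equal_no_echo_py := by
  intro buf _
  unfold Spec_no_echo_py no_echo_py no_echo_py_alt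
  rw [join_foldl_eq_findTail, findTail_splitKeep _ _ (by simp), loopB_eq_refScan]
  simp
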